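-- pv_equiv track=rewrite | github.com/Mllewellyn1992/Pricing-Analysis | credit-pricing-tool/extraction/financial_mapper.py | _collect_text_within_budget
-- ===== SOURCE A (Python) =====
-- def _collect_text_within_budget(raw_text, section_groups, max_chars):
--     """Collect text chunks from section groups up to max_chars budget.
--
--     Args:
--         section_groups: list of merged section lists, in priority order
--     Returns:
--         list of text chunks
--     """
--     parts = []
--     total_chars = 0
--     seen_ranges = set()
--
--     for sections in section_groups:
--         for start, end, _marker in sections:
--             # Deduplicate: skip if this range is largely contained in an already-added range
--             chunk_key = (start // 500, end // 500)
--             if chunk_key in seen_ranges: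
--                 continue
--             seen_ranges.add(chunk_key)
--
--             chunk = raw_text[start:end]
--             if total_chars + len(chunk) > max_chars:
--                 remaining = max_chars - total_chars
--                 if remaining > 500:
--                     parts.append(chunk[:remaining])
--                     total_chars += remaining
--                 return parts
--             parts.append(chunk)
--             total_chars += len(chunk)
--
--     return parts
-- ===== SOURCE B (Python) =====
-- def _collect_text_within_budget(raw_text, section_groups, max_chars):
--     """Two-phase: flatten+dedup all sections into an ordered chunk list,
--     then cut that list at the first prefix total exceeding max_chars."""
--     seen = set()
--     chunks = []
--     for sections in section_groups:
--         for start, end, _marker in sections: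
--             key = (start // 500, end // 500)
--             if key not in seen:
--                 seen.add(key)
--                 chunks.append(raw_text[start:end])
--     totals = []
--     running = 0
--     for chunk in chunks:
--         running += len(chunk)
--         totals.append(running)
--     cut = next((i for i, t in enumerate(totals) if t > max_chars), None)
--     if cut is None:
--         return chunks
--     remaining = max_chars - (totals[cut] - len(chunks[cut]))
--     if remaining > 500:
--         return chunks[:cut] + [chunks[cut][:remaining]]
--     return chunks[:cut]
-- ===== Notes on version B (the rewrite author's own statement) =====
-- stated objective: alternative
-- what changed: A's single interleaved loop (accumulator + dedup + early return) is replaced by a two-phase build-then-cut shape: first flatten all sections with the dedup filter into an ordered chunk list, then compute running prefix totals and cut at the first index whose total exceeds max_chars, with the >500 partial-chunk rule applied only at that boundary.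
import Mathlib
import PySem

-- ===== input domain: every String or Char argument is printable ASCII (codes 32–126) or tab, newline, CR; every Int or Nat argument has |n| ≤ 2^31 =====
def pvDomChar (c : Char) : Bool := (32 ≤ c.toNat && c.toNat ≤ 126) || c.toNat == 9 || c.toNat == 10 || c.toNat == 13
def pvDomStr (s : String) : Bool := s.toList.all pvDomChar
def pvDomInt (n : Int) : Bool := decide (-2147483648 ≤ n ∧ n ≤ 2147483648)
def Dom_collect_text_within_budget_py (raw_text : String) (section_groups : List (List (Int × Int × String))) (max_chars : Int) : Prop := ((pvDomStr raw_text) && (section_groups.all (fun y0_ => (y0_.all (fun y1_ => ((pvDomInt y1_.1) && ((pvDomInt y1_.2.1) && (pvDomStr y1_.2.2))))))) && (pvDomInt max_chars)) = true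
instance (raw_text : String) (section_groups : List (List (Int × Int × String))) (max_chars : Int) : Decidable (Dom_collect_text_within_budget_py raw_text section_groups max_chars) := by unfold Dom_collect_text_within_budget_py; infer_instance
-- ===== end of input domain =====

-- B replaces A's interleaved accumulate-and-return loop by a two-phase build-then-cut
-- shape (flatten+dedup first, then cut at the first prefix total over budget); objective: alternative.

-- ===== PORT A =====
-- inner 'for start, end, _marker in sections' loop; .inr = early 'return parts'
def pvAInner (raw_text : String) (max_chars : Int) :
    List (Int × Int × String) → List String × Int × PySem.Set (Int × Int) →
    (List String × Int × PySem.Set (Int × Int)) ⊕ List String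
  | [], st => .inl st
  | (start, stop, _marker) :: rest, (parts, total_chars, seen_ranges) =>
    let chunk_key := (PySem.Int.floordiv start 500, PySem.Int.floordiv stop 500)
    if PySem.Set.contains seen_ranges chunk_key then
      pvAInner raw_text max_chars rest (parts, total_chars, seen_ranges)
    else
      let seen' := PySem.Set.add seen_ranges chunk_key
      let chunk := PySem.Str.slice raw_text (some start) (some stop)
      if max_chars < total_chars + PySem.Str.len chunk then
        let remaining := max_chars - total_chars
        if 500 < remaining then
          .inr (parts ++ [PySem.Str.slice chunk none (some remaining)])
        else
          .inr parts
      else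
        pvAInner raw_text max_chars rest
          (parts ++ [chunk], total_chars + PySem.Str.len chunk, seen')

-- outer 'for sections in section_groups' loop
def pvAOuter (raw_text : String) (max_chars : Int) :
    List (List (Int × Int × String)) → List String × Int × PySem.Set (Int × Int) → List String
  | [], (parts, _, _) => parts
  | g :: gs, st =>
    match pvAInner raw_text max_chars g st with
    | .inl st' => pvAOuter raw_text max_chars gs st'
    | .inr parts => parts

def collect_text_within_budget_py (raw_text : String) (section_groups : List (List (Int × Int × String))) (max_chars : Int) : List String :=
  pvAOuter raw_text max_chars section_groups ([], 0, PySem.Set.empty)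

-- ===== PORT B =====
-- phase 1, inner loop: flatten one section list, applying the dedup filter
def pvBDedup1 (raw_text : String) :
    List (Int × Int × String) → PySem.Set (Int × Int) × List String →
    PySem.Set (Int × Int) × List String
  | [], st => st
  | (start, stop, _marker) :: rest, (seen, chunks) =>
    let key := (PySem.Int.floordiv start 500, PySem.Int.floordiv stop 500)
    if PySem.Set.contains seen key then
      pvBDedup1 raw_text rest (seen, chunks)
    else
      pvBDedup1 raw_text rest
        (PySem.Set.add seen key, chunks ++ [PySem.Str.slice raw_text (some start) (some stop)])

-- phase 1, outer loop over the groups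
def pvBDedupAll (raw_text : String) :
    List (List (Int × Int × String)) → PySem.Set (Int × Int) × List String →
    PySem.Set (Int × Int) × List String
  | [], st => st
  | g :: gs, st => pvBDedupAll raw_text gs (pvBDedup1 raw_text g st)

-- phase 2: running prefix totals ('running' accumulator loop of Source B)
def pvBTotals : Int → List String → List Int
  | _, [] => []
  | running, c :: rest =>
    (running + PySem.Str.len c) :: pvBTotals (running + PySem.Str.len c) rest

def collect_text_within_budget_py_alt (raw_text : String) (section_groups : List (List (Int × Int × String))) (max_chars : Int) : List String :=
  let chunks := (pvBDedupAll raw_text section_groups (PySem.Set.empty, [])).2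
  let totals := pvBTotals 0 chunks
  -- cut = next((i for i, t in enumerate(totals) if t > max_chars), None)
  match totals.findIdx? (fun t => decide (max_chars < t)) with
  | none => chunks
  | some cut =>
    let remaining := max_chars - (totals.getD cut 0 - PySem.Str.len (chunks.getD cut ""))
    if 500 < remaining then
      chunks.take cut ++ [PySem.Str.slice (chunks.getD cut "") none (some remaining)]
    else
      chunks.take cut

-- ===== PRECONDITION & SPEC =====
def Spec_collect_text_within_budget_py (raw_text : String) (section_groups : List (List (Int × Int × String))) (max_chars : Int) (out : List String) : Prop := out = collect_text_within_budget_py_alt raw_text section_groups max_chars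
instance (raw_text : String) (section_groups : List (List (Int × Int × String))) (max_chars : Int) (out : List String) : Decidable (Spec_collect_text_within_budget_py raw_text section_groups max_chars out) := by unfold Spec_collect_text_within_budget_py; infer_instance

-- ===== CLAIM (what is proved, stated in full; the proofs are below) =====
def Claim_equal_collect_text_within_budget_py : Prop := ∀ (raw_text : String) (section_groups : List (List (Int × Int × String))) (max_chars : Int), Dom_collect_text_within_budget_py raw_text section_groups max_chars → Spec_collect_text_within_budget_py raw_text section_groups max_chars (collect_text_within_budget_py raw_text section_groups max_chars)

-- ===== LEMMAS AND PROOFS =====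

-- proof-only helpers: non-accumulating dedup, the reference cut, and a fits predicate
def pvDed (raw_text : String) : PySem.Set (Int × Int) → List (Int × Int × String) →
    List String × PySem.Set (Int × Int)
  | seen, [] => ([], seen)
  | seen, (start, stop, _) :: rest =>
    let key := (PySem.Int.floordiv start 500, PySem.Int.floordiv stop 500)
    if PySem.Set.contains seen key then pvDed raw_text seen rest
    else
      let p := pvDed raw_text (PySem.Set.add seen key) rest
      (PySem.Str.slice raw_text (some start) (some stop) :: p.1, p.2)

def pvDedAll (raw_text : String) : PySem.Set (Int × Int) → List (List (Int × Int × String)) →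
    List String × PySem.Set (Int × Int)
  | seen, [] => ([], seen)
  | seen, g :: gs =>
    let p := pvDed raw_text seen g
    let q := pvDedAll raw_text p.2 gs
    (p.1 ++ q.1, q.2)

def pvSumLen (cs : List String) : Int := (cs.map PySem.Str.len).sum

def pvCut (max_chars : Int) : Int → List String → List String
  | _, [] => []
  | total, c :: rest =>
    if max_chars < total + PySem.Str.len c then
      if 500 < max_chars - total then
        [PySem.Str.slice c none (some (max_chars - total))]
      else []
    else c :: pvCut max_chars (total + PySem.Str.len c) rest

def pvFits (max_chars : Int) : Int → List String → Bool
  | _, [] => true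
  | total, c :: rest =>
    !(decide (max_chars < total + PySem.Str.len c)) && pvFits max_chars (total + PySem.Str.len c) rest

theorem pvCut_append (m : Int) : ∀ (cs ds : List String) (t : Int),
    pvCut m t (cs ++ ds) =
      if pvFits m t cs then cs ++ pvCut m (t + pvSumLen cs) ds else pvCut m t cs := by
  intro cs
  induction cs with
  | nil => intro ds t; simp only [List.nil_append, pvFits, pvSumLen, List.map_nil,
      List.sum_nil, add_zero, if_true, pvCut]
  | cons c rest ih =>
    intro ds t
    by_cases hov : m < t + PySem.Str.len c
    · simp only [List.cons_append, pvCut, if_pos hov, pvFits, decide_eq_true hov,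
        Bool.not_true, Bool.false_and, Bool.false_eq_true, if_false]
    · have hd : decide (m < t + PySem.Str.len c) = false := decide_eq_false hov
      simp only [List.cons_append, pvCut, if_neg hov, pvFits, hd, Bool.not_false, Bool.true_and]
      rw [ih]
      by_cases hf : pvFits m (t + PySem.Str.len c) rest = true
      · have harith : t + PySem.Str.len c + pvSumLen rest = t + pvSumLen (c :: rest) := by
          simp only [pvSumLen, List.map_cons, List.sum_cons]; ring
        simp only [hf, if_true, harith]
      · simp only [hf, Bool.false_eq_true, if_false]
theorem pvAInner_char (raw : String) (m : Int) :
    ∀ (g : List (Int × Int × String)) (parts : List String) (t : Int) (seen : PySem.Set (Int × Int)),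
      pvAInner raw m g (parts, t, seen) =
        (if pvFits m t (pvDed raw seen g).1 then
          Sum.inl (parts ++ (pvDed raw seen g).1, t + pvSumLen (pvDed raw seen g).1, (pvDed raw seen g).2)
        else Sum.inr (parts ++ pvCut m t (pvDed raw seen g).1)) := by
  intro g
  induction g with
  | nil =>
    intro parts t seen
    simp only [pvAInner, pvDed, pvFits, if_true, List.append_nil, pvSumLen, List.map_nil,
      List.sum_nil, add_zero]
  | cons x rest ih =>
    intro parts t seen
    obtain ⟨start, stop, mk⟩ := x
    by_cases hseen : PySem.Set.contains seen (PySem.Int.floordiv start 500, PySem.Int.floordiv stop 500) = true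
    · simp only [pvAInner, pvDed, hseen, if_true]
      exact ih parts t seen
    · have hseen' : PySem.Set.contains seen (PySem.Int.floordiv start 500, PySem.Int.floordiv stop 500) = false :=
        Bool.not_eq_true _ |>.mp hseen
      by_cases hov : m < t + PySem.Str.len (PySem.Str.slice raw (some start) (some stop))
      · have hd := decide_eq_true hov
        simp only [pvAInner, pvDed, hseen', Bool.false_eq_true, if_false, if_pos hov, pvFits,
          hd, Bool.not_true, Bool.false_and, pvCut]
        by_cases h5 : (500:Int) < m - t
        · simp only [h5, if_true]
        · simp only [h5, if_false, List.append_nil]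
      · have hd := decide_eq_false hov
        simp only [pvAInner, pvDed, hseen', Bool.false_eq_true, if_false, if_neg hov]
        rw [ih]
        have harith : t + PySem.Str.len (PySem.Str.slice raw (some start) (some stop))
            + pvSumLen (pvDed raw (PySem.Set.add seen (PySem.Int.floordiv start 500, PySem.Int.floordiv stop 500)) rest).1
            = t + pvSumLen (PySem.Str.slice raw (some start) (some stop) ::
                (pvDed raw (PySem.Set.add seen (PySem.Int.floordiv start 500, PySem.Int.floordiv stop 500)) rest).1) := by
          simp only [pvSumLen, List.map_cons, List.sum_cons]; ring
        simp only [pvFits, hd, Bool.not_false, Bool.true_and, pvCut, if_neg hov, harith]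
        by_cases hf : pvFits m (t + PySem.Str.len (PySem.Str.slice raw (some start) (some stop)))
            (pvDed raw (PySem.Set.add seen (PySem.Int.floordiv start 500, PySem.Int.floordiv stop 500)) rest).1 = true
        · simp only [hf, if_true, List.append_assoc, List.singleton_append]
        · simp only [hf, Bool.false_eq_true, if_false, List.append_assoc, List.singleton_append]
theorem pvAOuter_char (raw : String) (m : Int) :
    ∀ (gs : List (List (Int × Int × String))) (parts : List String) (t : Int) (seen : PySem.Set (Int × Int)),
      pvAOuter raw m gs (parts, t, seen) = parts ++ pvCut m t (pvDedAll raw seen gs).1 := by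
  intro gs
  induction gs with
  | nil => intro parts t seen; simp only [pvAOuter, pvDedAll, pvCut, List.append_nil]
  | cons g rest ih =>
    intro parts t seen
    simp only [pvAOuter, pvAInner_char, pvDedAll]
    rw [pvCut_append]
    by_cases hf : pvFits m t (pvDed raw seen g).1 = true
    · simp only [hf, if_true, ih, List.append_assoc]
    · simp only [hf, Bool.false_eq_true, if_false]

theorem pvBDedup1_char (raw : String) :
    ∀ (g : List (Int × Int × String)) (seen : PySem.Set (Int × Int)) (acc : List String),
      pvBDedup1 raw g (seen, acc) = ((pvDed raw seen g).2, acc ++ (pvDed raw seen g).1) := by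
  intro g
  induction g with
  | nil => intro seen acc; simp only [pvBDedup1, pvDed, List.append_nil]
  | cons x rest ih =>
    intro seen acc
    obtain ⟨start, stop, mk⟩ := x
    by_cases hseen : PySem.Set.contains seen (PySem.Int.floordiv start 500, PySem.Int.floordiv stop 500) = true
    · simp only [pvBDedup1, pvDed, hseen, if_true]; exact ih seen acc
    · have hseen' : PySem.Set.contains seen (PySem.Int.floordiv start 500, PySem.Int.floordiv stop 500) = false :=
        Bool.not_eq_true _ |>.mp hseen
      simp only [pvBDedup1, pvDed, hseen', Bool.false_eq_true, if_false, ih,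
        List.append_assoc, List.singleton_append]

theorem pvBDedupAll_char (raw : String) :
    ∀ (gs : List (List (Int × Int × String))) (seen : PySem.Set (Int × Int)) (acc : List String),
      pvBDedupAll raw gs (seen, acc) = ((pvDedAll raw seen gs).2, acc ++ (pvDedAll raw seen gs).1) := by
  intro gs
  induction gs with
  | nil => intro seen acc; simp only [pvBDedupAll, pvDedAll, List.append_nil]
  | cons g rest ih =>
    intro seen acc
    simp only [pvBDedupAll, pvBDedup1_char, ih, pvDedAll, List.append_assoc]

theorem pvBCut_char (m : Int) :
    ∀ (cs : List String) (t : Int),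
      (match (pvBTotals t cs).findIdx? (fun x => decide (m < x)) with
       | none => cs
       | some cut =>
         if 500 < m - ((pvBTotals t cs).getD cut 0 - PySem.Str.len (cs.getD cut "")) then
           cs.take cut ++ [PySem.Str.slice (cs.getD cut "") none
             (some (m - ((pvBTotals t cs).getD cut 0 - PySem.Str.len (cs.getD cut ""))))]
         else cs.take cut)
      = pvCut m t cs := by
  intro cs
  induction cs with
  | nil => intro t; simp only [pvBTotals, List.findIdx?_nil, pvCut]
  | cons c rest ih =>
    intro t
    simp only [pvBTotals, List.findIdx?_cons]
    by_cases hov : m < t + PySem.Str.len c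
    · have hd := decide_eq_true hov
      have hr : t + PySem.Str.len c - PySem.Str.len c = t := by ring
      simp only [hd, if_true, List.getD_cons_zero, hr, List.take_zero, List.nil_append,
        pvCut, if_pos hov]
    · have hd := decide_eq_false hov
      simp only [hd, Bool.false_eq_true, if_false]
      rcases h : (pvBTotals (t + PySem.Str.len c) rest).findIdx? (fun x => decide (m < x)) with _ | i
      · have hih := ih (t + PySem.Str.len c)
        rw [h] at hih
        simp only [Option.map_none, pvCut, if_neg hov, ← hih]
      · have hih := ih (t + PySem.Str.len c)
        rw [h] at hih
        simp only [Option.map_some, List.getD_cons_succ, List.take_succ_cons,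
          pvCut, if_neg hov, ← hih]
        by_cases h5 : 500 < m - ((pvBTotals (t + PySem.Str.len c) rest).getD i 0
            - PySem.Str.len (rest.getD i ""))
        · simp only [h5, if_true, List.cons_append]
        · simp only [h5, if_false]
-- ===== VERDICT (by name: the statement is the Claim_ definition above) =====
theorem collect_text_within_budget_py_spec : Claim_equal_collect_text_within_budget_py := by
  intro raw gs m _
  unfold Spec_collect_text_within_budget_py
  unfold collect_text_within_budget_py collect_text_within_budget_py_alt
  rw [pvAOuter_char, pvBDedupAll_char]
  simp only [List.nil_append]
  rw [pvBCut_char]
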